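-- pv_equiv track=rewrite | github.com/RamananVr/Leetcodepython | arrays_combinatorics/2198_Number_of_Single_Divisor_Triplets.py | singleDivisorTriplets
-- ===== SOURCE A (Python) =====
-- from itertools import combinations
--
-- def singleDivisorTriplets(nums):
--     """
--     Function to calculate the number of single divisor triplets in the array.
--
--     :param nums: List[int] - The input array of integers.
--     :return: int - The number of single divisor triplets.
--     """
--     count = 0
--     n = len(nums)
--
--     # Iterate over all combinations of triplets
--     for i, j, k in combinations(range(n), 3):
--         triplet_sum = nums[i] + nums[j] + nums[k]
--         divisors = 0
--
--         # Check divisors of the triplet sum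
--         for d in range(1, triplet_sum + 1):
--             if triplet_sum % d == 0:
--                 divisors += 1
--             if divisors > 1:
--                 break
--
--         # If exactly one divisor, increment the count
--         if divisors == 1:
--             count += 1
--
--     return count
-- ===== SOURCE B (Python) =====
-- def singleDivisorTriplets(nums):
--     """
--     A positive integer has exactly one divisor iff it equals 1, so the task is
--     to count index triplets i < j < k with nums[i] + nums[j] + nums[k] == 1.
--     One pass over k with a dictionary of pair sums of earlier indices: O(n^2).
--     """
--     count = 0
--     pair_sums = {}
--     for k in range(len(nums)):
--         count += pair_sums.get(1 - nums[k], 0)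
--         for j in range(k):
--             s = nums[j] + nums[k]
--             pair_sums[s] = pair_sums.get(s, 0) + 1
--     return count
-- ===== Notes on version B (the rewrite author's own statement) =====
-- stated objective: faster
-- what changed: A sum has exactly one divisor iff it equals 1, so B counts triplets summing to 1 in one O(n^2) pass with a dictionary of pair sums of earlier indices, removing both the third index loop and the per-triplet divisor-counting loop.
import Mathlib
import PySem

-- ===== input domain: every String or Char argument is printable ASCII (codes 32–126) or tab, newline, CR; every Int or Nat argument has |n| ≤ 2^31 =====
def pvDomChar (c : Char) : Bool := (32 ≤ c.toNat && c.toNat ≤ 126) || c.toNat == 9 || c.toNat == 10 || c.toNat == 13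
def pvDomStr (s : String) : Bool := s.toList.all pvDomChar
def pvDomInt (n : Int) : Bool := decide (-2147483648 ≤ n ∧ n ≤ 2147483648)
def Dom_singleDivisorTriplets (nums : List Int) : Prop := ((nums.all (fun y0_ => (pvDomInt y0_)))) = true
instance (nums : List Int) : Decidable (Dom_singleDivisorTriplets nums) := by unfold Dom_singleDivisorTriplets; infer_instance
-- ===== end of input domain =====

-- B replaces A's triple index loop with per-triplet divisor counting by a
-- single quadratic pass counting triplets that sum to 1 via a dict of pair sums.

-- ===== PORT A =====
-- hand port of `for d in range(1, s+1): ... if divisors > 1: break` (early-exit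
-- loop; fuel = number of remaining iterations, exact since the range is finite)
def pvDivLoop (s : Int) : Nat → Int → Int → Int
  | 0, _, divisors => divisors
  | fuel+1, d, divisors =>
    let divisors' := if PySem.Int.mod s d = 0 then divisors + 1 else divisors
    if divisors' > 1 then divisors' else pvDivLoop s fuel (d+1) divisors'

-- combinations(range(n), 3) is ported as three nested index loops with the
-- i < j < k guard; all indices are in range, so nums[i] = nums.getD i 0 exactly.
def singleDivisorTriplets (nums : List Int) : Int :=
  let n := nums.length
  (List.range n).foldl (fun count i =>
    (List.range n).foldl (fun count j =>
      (List.range n).foldl (fun count k =>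
        if i < j ∧ j < k then
          let s := nums.getD i 0 + nums.getD j 0 + nums.getD k 0
          if pvDivLoop s s.toNat 1 0 = 1 then count + 1 else count
        else count) count) count) 0

-- ===== PORT B =====
def singleDivisorTriplets_alt (nums : List Int) : Int :=
  ((List.range nums.length).foldl (fun (st : Int × PySem.Dict Int Int) k =>
      let count := st.1 + st.2.getD (1 - nums.getD k 0) 0
      let ps := (List.range k).foldl (fun ps j =>
          let s := nums.getD j 0 + nums.getD k 0
          ps.insert s (ps.getD s 0 + 1)) st.2
      (count, ps)) ((0 : Int), (PySem.Dict.empty : PySem.Dict Int Int))).1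

-- ===== PRECONDITION & SPEC =====
def Spec_singleDivisorTriplets (nums : List Int) (out : Int) : Prop := out = singleDivisorTriplets_alt nums
instance (nums : List Int) (out : Int) : Decidable (Spec_singleDivisorTriplets nums out) := by unfold Spec_singleDivisorTriplets; infer_instance

-- ===== CLAIM (what is proved, stated in full; the proofs are below) =====
def Claim_equal_singleDivisorTriplets : Prop := ∀ (nums : List Int), Dom_singleDivisorTriplets nums → Spec_singleDivisorTriplets nums (singleDivisorTriplets nums)

-- ===== LEMMAS AND PROOFS =====

-- the 0/1 summand: does the index triple (i, j, k) sum to 1?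
def pvF (nums : List Int) (i j k : Nat) : Int :=
  if nums.getD i 0 + nums.getD j 0 + nums.getD k 0 = 1 then 1 else 0

-- pair-sum counter after the first m outer iterations of B
def pvPC (nums : List Int) (m : Nat) (s : Int) : Int :=
  ∑ k ∈ Finset.range m, ∑ j ∈ Finset.range k,
    (if nums.getD j 0 + nums.getD k 0 = s then 1 else 0)

theorem pvDivLoop_reach_two (s : Int) :
    ∀ (fuel : Nat) (d : Int),
      (∃ e : Int, d ≤ e ∧ e < d + fuel ∧ PySem.Int.mod s e = 0) →
      pvDivLoop s fuel d 1 = 2 := by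
  intro fuel
  induction fuel with
  | zero =>
    rintro d ⟨e, h1, h2, -⟩
    exfalso; push_cast at h2; omega
  | succ f ih =>
    rintro d ⟨e, h1, h2, h3⟩
    by_cases hd : PySem.Int.mod s d = 0
    · simp [pvDivLoop, hd]
    · have hde : e ≠ d := fun h => hd (h ▸ h3)
      have hstep : pvDivLoop s (f+1) d 1 = pvDivLoop s f (d+1) 1 := by
        simp [pvDivLoop, hd]
      rw [hstep]
      refine ih (d+1) ⟨e, by omega, ?_, h3⟩
      push_cast at h2 ⊢; omega

theorem pvDivLoop_eq_one_iff (s : Int) :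
    (pvDivLoop s s.toNat 1 0 = 1) ↔ s = 1 := by
  rcases lt_trichotomy s 1 with h | h | h
  · have h0 : s.toNat = 0 := by omega
    rw [h0]
    simp only [pvDivLoop]
    omega
  · subst h; decide
  · obtain ⟨f, hf⟩ : ∃ f : Nat, s.toNat = f + 1 := ⟨s.toNat - 1, by omega⟩
    have hstep : pvDivLoop s s.toNat 1 0 = pvDivLoop s f 2 1 := by
      rw [hf]; simp [pvDivLoop]
    have hs2 : pvDivLoop s f 2 1 = 2 := by
      refine pvDivLoop_reach_two s f 2 ⟨s, by omega, ?_, ?_⟩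
      · have : (f : Int) = s - 1 := by omega
        omega
      · rw [PySem.Int.mod_eq_zero_iff_dvd]
    rw [hstep, hs2]
    constructor <;> intro hh <;> omega

theorem pv_foldl_range_add (n : Nat) (F : Int → Nat → Int) (g : Nat → Int)
    (h : ∀ c x, F c x = c + g x) (c : Int) :
    (List.range n).foldl F c = c + ∑ x ∈ Finset.range n, g x := by
  have hl : ∀ (l : List Nat) (c : Int), l.foldl F c = c + (l.map g).sum := by
    intro l
    induction l with
    | nil => simp
    | cons x t ih => intro c; simp [h, ih, add_assoc]
  rw [hl]
  congr 1

theorem pvA_eq (nums : List Int) :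
    singleDivisorTriplets nums =
      ∑ i ∈ Finset.range nums.length, ∑ j ∈ Finset.range nums.length,
        ∑ k ∈ Finset.range nums.length,
          (if i < j ∧ j < k then pvF nums i j k else 0) := by
  have h3 : ∀ (i j : Nat) (c : Int),
      (List.range nums.length).foldl (fun count k =>
        if i < j ∧ j < k then
          let s := nums.getD i 0 + nums.getD j 0 + nums.getD k 0
          if pvDivLoop s s.toNat 1 0 = 1 then count + 1 else count
        else count) c
      = c + ∑ k ∈ Finset.range nums.length,
          (if i < j ∧ j < k then pvF nums i j k else 0) := by
    intro i j c
    refine pv_foldl_range_add _ _ _ (fun c k => ?_) c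
    by_cases h1 : i < j ∧ j < k
    · simp only [h1, pvF, pvDivLoop_eq_one_iff]
      split_ifs <;> omega
    · simp [h1]
  have h2 : ∀ (i : Nat) (c : Int),
      (List.range nums.length).foldl (fun count j =>
        (List.range nums.length).foldl (fun count k =>
          if i < j ∧ j < k then
            let s := nums.getD i 0 + nums.getD j 0 + nums.getD k 0
            if pvDivLoop s s.toNat 1 0 = 1 then count + 1 else count
          else count) count) c
      = c + ∑ j ∈ Finset.range nums.length, ∑ k ∈ Finset.range nums.length,
          (if i < j ∧ j < k then pvF nums i j k else 0) :=
    fun i c => pv_foldl_range_add _ _ _ (fun c j => h3 i j c) c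
  have h1 := pv_foldl_range_add nums.length _ _ (fun c i => h2 i c) 0
  simpa [singleDivisorTriplets] using h1

theorem pv_innerDict (nums : List Int) (x : Int) (q : Int → Int) :
    ∀ (m : Nat) (d : PySem.Dict Int Int), (∀ s, d.getD s 0 = q s) →
      ∀ s, ((List.range m).foldl (fun ps j =>
              let t := nums.getD j 0 + x
              ps.insert t (ps.getD t 0 + 1)) d).getD s 0
        = q s + ∑ j ∈ Finset.range m, (if nums.getD j 0 + x = s then 1 else 0) := by
  intro m
  induction m with
  | zero => intro d hd s; simpa using hd s
  | succ m ih =>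
    intro d hd s
    rw [List.range_succ, List.foldl_append]
    simp only [List.foldl_cons, List.foldl_nil]
    rw [PySem.Dict.getD_insert]
    by_cases hs : s = nums.getD m 0 + x
    · rw [if_pos hs, ih d hd, Finset.sum_range_succ, hs, if_pos rfl]
      ring
    · rw [if_neg hs, ih d hd, Finset.sum_range_succ]
      have : (if nums.getD m 0 + x = s then (1:Int) else 0) = 0 := by
        rw [if_neg (fun h => hs h.symm)]
      rw [this, add_zero]

theorem pv_outerFold (nums : List Int) (m : Nat) :
    ((List.range m).foldl (fun (st : Int × PySem.Dict Int Int) k =>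
        let count := st.1 + st.2.getD (1 - nums.getD k 0) 0
        let ps := (List.range k).foldl (fun ps j =>
            let s := nums.getD j 0 + nums.getD k 0
            ps.insert s (ps.getD s 0 + 1)) st.2
        (count, ps)) ((0 : Int), (PySem.Dict.empty : PySem.Dict Int Int))).1
      = (∑ k ∈ Finset.range m, pvPC nums k (1 - nums.getD k 0))
    ∧ ∀ s, ((List.range m).foldl (fun (st : Int × PySem.Dict Int Int) k =>
        let count := st.1 + st.2.getD (1 - nums.getD k 0) 0
        let ps := (List.range k).foldl (fun ps j =>
            let s := nums.getD j 0 + nums.getD k 0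
            ps.insert s (ps.getD s 0 + 1)) st.2
        (count, ps)) ((0 : Int), (PySem.Dict.empty : PySem.Dict Int Int))).2.getD s 0
      = pvPC nums m s := by
  induction m with
  | zero =>
    constructor
    · simp
    · intro s; simp [pvPC]
  | succ m ih =>
    obtain ⟨hc, hd⟩ := ih
    rw [List.range_succ, List.foldl_append]
    simp only [List.foldl_cons, List.foldl_nil]
    constructor
    · rw [hc, hd, Finset.sum_range_succ]
    · intro s
      rw [pv_innerDict nums (nums.getD m 0) (pvPC nums m) m _ hd s]
      simp only [pvPC, Finset.sum_range_succ]

theorem pvB_eq (nums : List Int) :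
    singleDivisorTriplets_alt nums =
      ∑ k ∈ Finset.range nums.length, ∑ j ∈ Finset.range k,
        ∑ i ∈ Finset.range j, pvF nums i j k := by
  rw [singleDivisorTriplets_alt, (pv_outerFold nums nums.length).1]
  refine Finset.sum_congr rfl fun k _ => ?_
  refine Finset.sum_congr rfl fun j _ => ?_
  refine Finset.sum_congr rfl fun i _ => ?_
  unfold pvF
  exact if_congr (by omega) rfl rfl

theorem pv_sum_range_ite (n k : Nat) (hk : k ≤ n) (h : Nat → Int) :
    (∑ j ∈ Finset.range n, (if j < k then h j else 0)) = ∑ j ∈ Finset.range k, h j := by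
  rw [← Finset.sum_filter]
  apply Finset.sum_congr _ (fun _ _ => rfl)
  ext x; simp [Finset.mem_filter, Finset.mem_range]; omega

-- ===== VERDICT (by name: the statement is the Claim_ definition above) =====
theorem singleDivisorTriplets_spec : Claim_equal_singleDivisorTriplets := by
  intro nums _
  show singleDivisorTriplets nums = singleDivisorTriplets_alt nums
  rw [pvA_eq, pvB_eq]
  calc ∑ i ∈ Finset.range nums.length, ∑ j ∈ Finset.range nums.length,
        ∑ k ∈ Finset.range nums.length, (if i < j ∧ j < k then pvF nums i j k else 0)
      = ∑ i ∈ Finset.range nums.length, ∑ k ∈ Finset.range nums.length,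
        ∑ j ∈ Finset.range nums.length, (if i < j ∧ j < k then pvF nums i j k else 0) :=
        Finset.sum_congr rfl fun i _ => Finset.sum_comm
    _ = ∑ k ∈ Finset.range nums.length, ∑ i ∈ Finset.range nums.length,
        ∑ j ∈ Finset.range nums.length, (if i < j ∧ j < k then pvF nums i j k else 0) :=
        Finset.sum_comm
    _ = ∑ k ∈ Finset.range nums.length, ∑ j ∈ Finset.range nums.length,
        ∑ i ∈ Finset.range nums.length, (if i < j ∧ j < k then pvF nums i j k else 0) :=
        Finset.sum_congr rfl fun k _ => Finset.sum_comm
    _ = ∑ k ∈ Finset.range nums.length, ∑ j ∈ Finset.range k,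
        ∑ i ∈ Finset.range j, pvF nums i j k := by
        refine Finset.sum_congr rfl fun k hk => ?_
        rw [← pv_sum_range_ite nums.length k (le_of_lt (Finset.mem_range.mp hk))
              (fun j => ∑ i ∈ Finset.range j, pvF nums i j k)]
        refine Finset.sum_congr rfl fun j hj => ?_
        by_cases hjk : j < k
        · simp only [hjk, and_true, if_true]
          rw [← pv_sum_range_ite nums.length j (le_of_lt (Finset.mem_range.mp hj))
                (fun i => pvF nums i j k)]
        · simp [hjk]
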